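-- pv_equiv track=rewrite | github.com/ihajhasa/CMUQFreshmanHelper | CMUMap.py | createLinePath
-- ===== SOURCE A (Python) =====
-- def createLinePath(x):
--     #x would be a list that would have the coordinates you need to pass through in order
--     i = 0
--     path = []
--     while i < len(x) - 2:
--         #Add the start points of the line, and end points of the line
--         path = path + [[ x[i],x[i+1], x[i+2], x[i+3] ]]
--         #The end points of the previous line are the start of the next, which is why we only skip 2
--         i += 2
--     #Add the last line, that will connect where we end to where we started, because we are highlighting a box
--     path.append([x[-2], x[-1], x[0], x[1]])
--     #Return the list of lists
--     return path
-- ===== SOURCE B (Python) =====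
-- def createLinePath(x):
--     # Pair up the flat coordinate list into points, then join each point to its
--     # cyclic successor (the rotation folds the wrap-around segment into the zip).
--     pts = [(x[i], x[i + 1]) for i in range(0, len(x), 2)]
--     return [[a, b, c, d] for (a, b), (c, d) in zip(pts, pts[1:] + pts[:1])]
-- ===== Notes on version B (the rewrite author's own statement) =====
-- stated objective: alternative
-- what changed: Replaces A's stride-2 index loop with a separate trailing wrap-around append by reshaping the flat list into (x,y) points once and zipping each point with its cyclic successor, building all segments (including the wrap-around one) in one uniform pass.
import Mathlib
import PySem

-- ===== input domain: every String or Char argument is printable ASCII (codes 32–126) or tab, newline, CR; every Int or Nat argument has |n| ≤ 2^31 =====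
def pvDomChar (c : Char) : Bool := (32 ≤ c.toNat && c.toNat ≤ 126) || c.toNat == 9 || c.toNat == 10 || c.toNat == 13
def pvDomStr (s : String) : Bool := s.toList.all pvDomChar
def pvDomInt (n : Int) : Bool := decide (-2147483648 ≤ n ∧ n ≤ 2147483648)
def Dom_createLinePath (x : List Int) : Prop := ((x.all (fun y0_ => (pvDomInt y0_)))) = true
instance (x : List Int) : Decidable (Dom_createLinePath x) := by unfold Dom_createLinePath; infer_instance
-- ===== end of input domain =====

-- B reshapes the flat list into (x,y) points and zips each point with its cyclic
-- successor, replacing A's stride-2 index loop and separate wrap-around append.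

-- ===== PORT A =====
-- x[i] (index known in range under Pre_; pyGetD returns the element there, 0 only off-Pre_)
def pvG (x : List Int) (i : Int) : Int := PySem.List.pyGetD x i 0

-- the while loop: i starts at 0, steps by 2 while i < len(x) - 2, appending one segment per turn
def createLinePathLoop (x : List Int) (i : Nat) : List (List Int) :=
  if (i : Int) < (x.length : Int) - 2 then
    [pvG x i, pvG x (i + 1), pvG x (i + 2), pvG x (i + 3)] :: createLinePathLoop x (i + 2)
  else []
termination_by x.length - i
decreasing_by omega

def createLinePath (x : List Int) : List (List Int) :=
  createLinePathLoop x 0 ++ [[pvG x (-2), pvG x (-1), pvG x 0, pvG x 1]]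

-- ===== PORT B =====
def createLinePath_alt (x : List Int) : List (List Int) :=
  let pts := (PySem.List.pyRange 0 (x.length : Int) 2).map (fun i => (pvG x i, pvG x (i + 1)))
  (pts.zip (PySem.List.slice pts (some 1) none ++ PySem.List.slice pts none (some 1))).map
    (fun p => [p.1.1, p.1.2, p.2.1, p.2.2])

-- ===== PRECONDITION & SPEC =====
-- Pre_ excludes exactly the inputs on which the Python A raises IndexError:
-- the empty list (x[-2]) and odd-length lists (x[i+3] or x[i+1] past the end).
def Pre_createLinePath (x : List Int) : Prop := x ≠ [] ∧ x.length % 2 = 0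
instance (x : List Int) : Decidable (Pre_createLinePath x) := by unfold Pre_createLinePath; infer_instance
def pvWitness_createLinePath : List Int := [1, 2, 3, 4]

def Spec_createLinePath (x : List Int) (out : List (List Int)) : Prop := out = createLinePath_alt x
instance (x : List Int) (out : List (List Int)) : Decidable (Spec_createLinePath x out) := by unfold Spec_createLinePath; infer_instance

-- ===== CLAIM (what is proved, stated in full; the proofs are below) =====
def Claim_equal_createLinePath : Prop := ∀ (x : List Int), Dom_createLinePath x → Pre_createLinePath x → Spec_createLinePath x (createLinePath x)

-- ===== LEMMAS AND PROOFS =====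

-- the flat list reshaped into consecutive coordinate pairs
def pvPairs : List Int → List (Int × Int)
  | a :: b :: r => (a, b) :: pvPairs r
  | _ => []

-- segments joining consecutive points of a point list
def pvAdjSeg : List (Int × Int) → List (List Int)
  | p :: q :: r => [p.1, p.2, q.1, q.2] :: pvAdjSeg (q :: r)
  | _ => []
termination_by l => l.length
decreasing_by simp

-- what A's loop computes, as structural recursion on the suffix
def pvChain : List Int → List (List Int)
  | a :: b :: c :: r => [a, b, c, r.headD 0] :: pvChain (c :: r)
  | _ => []
termination_by l => l.length
decreasing_by simp

theorem pvPairs_cons (a b : Int) (r : List Int) : pvPairs (a :: b :: r) = (a, b) :: pvPairs r := rfl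

theorem pvAdjSeg_cons (p q : Int × Int) (r : List (Int × Int)) :
    pvAdjSeg (p :: q :: r) = [p.1, p.2, q.1, q.2] :: pvAdjSeg (q :: r) := by
  simp [pvAdjSeg]

theorem pvChain_cons (a b c : Int) (r : List Int) :
    pvChain (a :: b :: c :: r) = [a, b, c, r.headD 0] :: pvChain (c :: r) := by
  simp [pvChain]

theorem pvChain_short (l : List Int) (h : l.length ≤ 2) : pvChain l = [] := by
  match l with
  | [] => simp [pvChain]
  | [a] => simp [pvChain]
  | [a, b] => simp [pvChain]
  | a :: b :: c :: r => simp at h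

theorem pvG_natCast (x : List Int) (n : Nat) : pvG x (n : Int) = x.getD n 0 := by
  simp [pvG, PySem.List.pyGetD_natCast]

theorem createLinePathLoop_eq (x : List Int) (i : Nat) :
    createLinePathLoop x i = pvChain (x.drop i) := by
  rw [createLinePathLoop]
  by_cases h : (i : Int) < (x.length : Int) - 2
  · have h2 : i + 2 < x.length := by omega
    have h0 : i < x.length := by omega
    have h1 : i + 1 < x.length := by omega
    rw [if_pos h, createLinePathLoop_eq x (i + 2)]
    rw [List.drop_eq_getElem_cons h0, List.drop_eq_getElem_cons h1, List.drop_eq_getElem_cons h2]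
    rw [pvChain_cons]
    have hg : ∀ (k : Nat) (hk : k < x.length), pvG x (k : Int) = x[k] := by
      intro k hk; rw [pvG_natCast]; exact List.getD_eq_getElem x 0 hk
    have hpush : ∀ (k : Nat), ((i : Int) + (k : Int)) = ((i + k : Nat) : Int) := by
      intro k; push_cast; ring
    have hhead : (x.drop (i + 3)).headD 0 = pvG x ((i : Int) + 3) := by
      rw [show ((i : Int) + 3) = ((i + 3 : Nat) : Int) from by push_cast; ring, pvG_natCast]
      rcases Nat.lt_or_ge (i + 3) x.length with hlt | hge
      · rw [List.drop_eq_getElem_cons hlt]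
        simp
      · rw [List.drop_eq_nil_of_le hge]
        simp [List.getD_eq_getElem?_getD, List.getElem?_eq_none (by omega : x.length ≤ i + 3)]
    congr 1
    rw [hg i h0,
      show ((i : Int) + 1) = ((i + 1 : Nat) : Int) from hpush 1,
      show ((i : Int) + 2) = ((i + 2 : Nat) : Int) from hpush 2,
      hg (i + 1) h1, hg (i + 2) h2, hhead]
  · rw [if_neg h, pvChain_short]
    simp; omega
termination_by x.length - i
decreasing_by omega

theorem pvChain_eq_adjSeg (x : List Int) (h : x.length % 2 = 0) :
    pvChain x = pvAdjSeg (pvPairs x) := by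
  match x with
  | [] => simp [pvChain, pvAdjSeg, pvPairs]
  | [a] => simp at h
  | [a, b] => simp [pvChain, pvAdjSeg, pvPairs]
  | [a, b, c] => simp at h
  | a :: b :: c :: d :: r =>
    rw [pvChain_cons]
    have hr : (c :: d :: r).length % 2 = 0 := by simp at h ⊢; omega
    rw [pvChain_eq_adjSeg (c :: d :: r) hr]
    rw [show pvPairs (c :: d :: r) = (c, d) :: pvPairs r from rfl,
      show pvPairs (a :: b :: c :: d :: r) = (a, b) :: (c, d) :: pvPairs r from rfl,
      pvAdjSeg_cons]
    try rfl
termination_by x.length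
decreasing_by simp

-- pyRange(k, len x, 2) mapped through the pair constructor is pvPairs of the suffix
theorem pyRange_two_cons (a b : Int) (h : a < b) :
    PySem.List.pyRange a b 2 = a :: PySem.List.pyRange (a + 2) b 2 := by
  rw [PySem.List.pyRange_of_pos a b (by norm_num), PySem.List.pyRange_of_pos (a + 2) b (by norm_num)]
  rw [if_pos h]
  by_cases h2 : a + 2 < b
  · rw [if_pos h2]
    have hc : ((b - a + 2 - 1) / 2).toNat = ((b - (a + 2) + 2 - 1) / 2).toNat + 1 := by
      have : (b - a + 2 - 1) / 2 = (b - (a + 2) + 2 - 1) / 2 + 1 := by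
        rw [show b - a + 2 - 1 = (b - (a + 2) + 2 - 1) + 1 * 2 by ring, Int.add_mul_ediv_right _ _ (by norm_num)]
      omega
    rw [hc, List.range_succ_eq_map]
    simp only [List.map_cons, List.map_map, Function.comp_def]
    congr 1
    · norm_num
    · apply List.map_congr_left
      intro k _; push_cast; ring
  · rw [if_neg h2]
    have hc : ((b - a + 2 - 1) / 2).toNat = 1 := by omega
    rw [hc]
    simp

theorem pyRange_two_nil (a b : Int) (h : b ≤ a) : PySem.List.pyRange a b 2 = [] := by
  rw [PySem.List.pyRange_of_pos a b (by norm_num), if_neg (by omega)]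
  simp

theorem map_pyRange_eq_pairs (v : List Int) (x : List Int) (k : Nat)
    (hd : x.drop k = v) (hk : k % 2 = 0) (hx : x.length % 2 = 0) :
    (PySem.List.pyRange (k : Int) (x.length : Int) 2).map (fun i => (pvG x i, pvG x (i + 1))) = pvPairs v := by
  match v with
  | [] =>
    have : x.length ≤ k := by
      have := congrArg List.length hd; simp at this; omega
    rw [pyRange_two_nil _ _ (by exact_mod_cast this)]
    rfl
  | [a] =>
    have := congrArg List.length hd; simp at this; omega
  | a :: b :: r =>
    have hlen : x.length = k + 2 + r.length := by
      have := congrArg List.length hd; simp at this; omega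
    have hklt : (k : Int) < (x.length : Int) := by exact_mod_cast (by omega : k < x.length)
    rw [pyRange_two_cons _ _ hklt]
    rw [List.map_cons]
    have ha : x[k]? = some a := by
      rw [← List.head?_drop, hd]; rfl
    have hb : x[k+1]? = some b := by
      have : (x.drop k)[1]? = some b := by rw [hd]; rfl
      rwa [List.getElem?_drop] at this
    have hga : pvG x (k : Int) = a := by
      rw [pvG_natCast, List.getD_eq_getElem?_getD, ha]; rfl
    have hgb : pvG x ((k : Int) + 1) = b := by
      rw [show ((k : Int) + 1) = ((k + 1 : Nat) : Int) from by push_cast; ring, pvG_natCast,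
        List.getD_eq_getElem?_getD, hb]; rfl
    rw [hga, hgb]
    have hd2 : x.drop (k + 2) = r := by
      have : List.drop 2 (x.drop k) = r := by rw [hd]; rfl
      rwa [List.drop_drop] at this
    rw [show ((k : Int) + 2) = ((k + 2 : Nat) : Int) from by push_cast; ring]
    rw [map_pyRange_eq_pairs r x (k + 2) hd2 (by omega) hx]
    rfl
termination_by v.length

theorem zip_rot_eq_adjSeg (l : List (Int × Int)) (W : Int × Int) (_hne : l ≠ []) :
    (l.zip (l.drop 1 ++ [W])).map (fun p => [p.1.1, p.1.2, p.2.1, p.2.2]) = pvAdjSeg (l ++ [W]) := by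
  match l with
  | [P] => simp [pvAdjSeg]
  | P :: Q :: r =>
    have ih := zip_rot_eq_adjSeg (Q :: r) W (by simp)
    simp only [List.drop_one, List.tail_cons, List.cons_append, List.zip_cons_cons, List.map_cons] at ih ⊢
    rw [ih, pvAdjSeg_cons]

theorem adjSeg_append_last (x : List Int) (a b : Int) (h : x.length % 2 = 0) (W : Int × Int) :
    pvAdjSeg (pvPairs (a :: b :: x) ++ [W]) =
      pvAdjSeg (pvPairs (a :: b :: x)) ++
        [[(a :: b :: x).getD ((a :: b :: x).length - 2) 0, (a :: b :: x).getD ((a :: b :: x).length - 1) 0, W.1, W.2]] := by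
  match x with
  | [] => simp [pvPairs, pvAdjSeg]
  | [c] => simp at h
  | c :: d :: r =>
    have hr : r.length % 2 = 0 := by simp at h; omega
    have ih := adjSeg_append_last r c d hr W
    cases hp : pvPairs r ++ [W] with
    | nil => simp at hp
    | cons q t =>
      have e1 : pvPairs (a :: b :: c :: d :: r) ++ [W] = (a, b) :: (c, d) :: (pvPairs r ++ [W]) := by
        simp [pvPairs_cons]
      have e2 : pvPairs (c :: d :: r) ++ [W] = (c, d) :: (pvPairs r ++ [W]) := by
        simp [pvPairs_cons]
      rw [e2, hp] at ih
      rw [e1, hp, pvAdjSeg_cons, ih,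
        show pvPairs (a :: b :: c :: d :: r) = (a, b) :: (c, d) :: pvPairs r from rfl,
        pvAdjSeg_cons]
      have hlen : (a :: b :: c :: d :: r).getD ((a :: b :: c :: d :: r).length - 2) 0
          = (c :: d :: r).getD ((c :: d :: r).length - 2) 0 := by
        rw [show (a :: b :: c :: d :: r).length - 2 = ((c :: d :: r).length - 2) + 1 + 1 by simp,
          List.getD_cons_succ, List.getD_cons_succ]
      have hlen1 : (a :: b :: c :: d :: r).getD ((a :: b :: c :: d :: r).length - 1) 0
          = (c :: d :: r).getD ((c :: d :: r).length - 1) 0 := by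
        rw [show (a :: b :: c :: d :: r).length - 1 = ((c :: d :: r).length - 1) + 1 + 1 by simp,
          List.getD_cons_succ, List.getD_cons_succ]
      rw [hlen, hlen1]
      simp only [List.cons_append]
      rfl
termination_by x.length

theorem getD_neg (x : List Int) (h2 : 2 ≤ x.length) :
    pvG x (-2) = x.getD (x.length - 2) 0 ∧ pvG x (-1) = x.getD (x.length - 1) 0 := by
  constructor
  · rw [pvG, PySem.List.pyGetD_neg_ofNat x 2 0 (by norm_num) h2]
    exact (List.getD_eq_getElem x 0 (by omega)).symm
  · rw [pvG, PySem.List.pyGetD_neg_ofNat x 1 0 (by omega) (by omega)]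
    exact (List.getD_eq_getElem x 0 (by omega)).symm

-- ===== VERDICT (by name: the statement is the Claim_ definition above) =====
theorem createLinePath_spec : Claim_equal_createLinePath := by
  intro x _ hpre
  obtain ⟨hne, heven⟩ := hpre
  match x, hne with
  | [a], _ => simp at heven
  | a :: b :: r, _ =>
    set x := a :: b :: r with hx
    have hrlen : r.length % 2 = 0 := by simp [hx] at heven; omega
    have hxlen : x.length % 2 = 0 := heven
    show Spec_createLinePath x (createLinePath x)
    unfold Spec_createLinePath createLinePath createLinePath_alt
    rw [createLinePathLoop_eq x 0, List.drop_zero, pvChain_eq_adjSeg x hxlen]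
    have hpts : (PySem.List.pyRange 0 (x.length : Int) 2).map (fun i => (pvG x i, pvG x (i + 1))) = pvPairs x := by
      have := map_pyRange_eq_pairs x x 0 (by simp) (by norm_num) hxlen
      simpa using this
    simp only [hpts]
    have hpairs : pvPairs x = (a, b) :: pvPairs r := rfl
    rw [PySem.List.slice_from_one, PySem.List.slice_to (pvPairs x) (by norm_num : (0 : Int) ≤ 1)]
    rw [show ((1 : Int).toNat) = 1 from rfl, ← List.drop_one]
    have htake : (pvPairs x).take 1 = [(a, b)] := by rw [hpairs]; rfl
    rw [htake]
    rw [zip_rot_eq_adjSeg (pvPairs x) (a, b) (by rw [hpairs]; simp)]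
    rw [adjSeg_append_last r a b hrlen (a, b)]
    obtain ⟨hm2, hm1⟩ := getD_neg x (by simp [hx])
    rw [hm2, hm1]
    have h0 : pvG x 0 = a := by
      rw [show (0 : Int) = ((0 : Nat) : Int) from rfl, pvG_natCast]; rfl
    have h1 : pvG x 1 = b := by
      rw [show (1 : Int) = ((1 : Nat) : Int) from rfl, pvG_natCast]; rfl
    rw [h0, h1]
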